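-- pv_equiv track=rewrite | github.com/ccruza04/CRUD_proyect | articulo.py | _dividir_campos_escapados
-- ===== SOURCE A (Python) =====
-- def _dividir_campos_escapados(linea):
--     """Divide una línea en campos respetando el escape con barra invertida."""
--     campos = []
--     actual = []
--     escapando = False
--
--     for caracter in linea:
--         if escapando:
--             actual.append(caracter)
--             escapando = False
--         elif caracter == "\\":
--             escapando = True
--         elif caracter == "|":
--             campos.append("".join(actual))
--             actual = []
--         else:
--             actual.append(caracter)
--
--     if escapando:
--         return None
--
--     campos.append("".join(actual))
--     return campos
-- ===== SOURCE B (Python) =====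
-- import re
--
-- _TOKEN = re.compile(r'\\(.)|(\|)|(.)', re.DOTALL)
--
-- def _dividir_campos_escapados(linea):
--     """Divide una línea en campos respetando el escape con barra invertida.
--
--     Tokenizes the line with a regex into (escaped pair | pipe | plain char)
--     tokens instead of running a character state machine."""
--     campos = []
--     actual = []
--     for esc, pipe, plain in _TOKEN.findall(linea):
--         if esc:
--             actual.append(esc)
--         elif pipe:
--             campos.append("".join(actual))
--             actual = []
--         elif plain == "\\":
--             # a plain backslash can only be a dangling trailing escape
--             return None
--         else:
--             actual.append(plain)
--     campos.append("".join(actual))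
--     return campos
-- ===== Notes on version B (the rewrite author's own statement) =====
-- stated objective: idiomatic
-- what changed: Replaces the character-by-character escape state machine with a regex tokenizer (re.findall of escaped-pair | pipe | plain-char triples) and a loop over the tokens.
import Mathlib
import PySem

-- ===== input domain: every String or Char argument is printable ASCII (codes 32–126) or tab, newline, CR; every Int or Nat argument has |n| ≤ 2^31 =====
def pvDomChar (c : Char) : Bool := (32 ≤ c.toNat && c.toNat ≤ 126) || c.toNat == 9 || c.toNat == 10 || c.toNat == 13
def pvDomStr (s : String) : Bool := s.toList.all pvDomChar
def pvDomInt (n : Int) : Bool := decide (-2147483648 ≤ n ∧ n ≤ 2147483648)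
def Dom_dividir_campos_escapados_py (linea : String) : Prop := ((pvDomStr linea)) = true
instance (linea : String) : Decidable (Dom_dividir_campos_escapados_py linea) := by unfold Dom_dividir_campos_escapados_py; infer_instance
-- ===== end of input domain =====

-- B replaces A's per-character escape state machine with a regex tokenization pass (idiomatic; same cost).

-- ===== PORT A =====
-- A's for-loop over the characters with state (campos, actual, escapando)
def pvLoopA : List Char → List String → List Char → Bool → (List String × List Char × Bool)
  | [], campos, actual, esc => (campos, actual, esc)
  | c :: rest, campos, actual, esc =>
    if esc then pvLoopA rest campos (actual ++ [c]) false
    else if c = '\\' then pvLoopA rest campos actual true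
    else if c = '|' then pvLoopA rest (campos ++ [String.ofList actual]) [] false
    else pvLoopA rest campos (actual ++ [c]) false

def dividir_campos_escapados_py (linea : String) : Option (List String) :=
  match pvLoopA linea.toList [] [] false with
  | (campos, actual, esc) =>
    if esc then none else some (campos ++ [String.ofList actual])

-- ===== PORT B =====
-- hand port of re.findall(r'\\(.)|(\|)|(.)', linea, re.DOTALL): exact, since this regex's
-- alternation consumes, left to right, an escaped pair, else a pipe, else any single char
inductive PvTok where
  | esc : Char → PvTok
  | pipe : PvTok
  | plain : Char → PvTok
deriving DecidableEq, Repr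

def pvTokenize : List Char → List PvTok
  | '\\' :: c :: rest => .esc c :: pvTokenize rest
  | '|' :: rest => .pipe :: pvTokenize rest
  | c :: rest => .plain c :: pvTokenize rest
  | [] => []

-- B's for-loop over the tokens (early return None on a plain backslash)
def pvLoopB : List PvTok → List String → List Char → Option (List String)
  | [], campos, actual => some (campos ++ [String.ofList actual])
  | .esc c :: ts, campos, actual => pvLoopB ts campos (actual ++ [c])
  | .pipe :: ts, campos, actual => pvLoopB ts (campos ++ [String.ofList actual]) []
  | .plain c :: ts, campos, actual =>
    if c = '\\' then none else pvLoopB ts campos (actual ++ [c])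

def dividir_campos_escapados_py_alt (linea : String) : Option (List String) :=
  pvLoopB (pvTokenize linea.toList) [] []

-- ===== PRECONDITION & SPEC =====
def Spec_dividir_campos_escapados_py (linea : String) (out : Option (List String)) : Prop := out = dividir_campos_escapados_py_alt linea
instance (linea : String) (out : Option (List String)) : Decidable (Spec_dividir_campos_escapados_py linea out) := by unfold Spec_dividir_campos_escapados_py; infer_instance

-- ===== CLAIM (what is proved, stated in full; the proofs are below) =====
def Claim_equal_dividir_campos_escapados_py : Prop := ∀ (linea : String), Dom_dividir_campos_escapados_py linea → Spec_dividir_campos_escapados_py linea (dividir_campos_escapados_py linea)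

-- ===== LEMMAS AND PROOFS =====
-- main invariant: from any (campos, actual) with escapando = false, finishing A's loop
-- and applying the final escapando test equals running B's loop on the token stream
theorem pvLoop_eq : ∀ (cs : List Char) (campos : List String) (actual : List Char),
    (match pvLoopA cs campos actual false with
     | (ca, ac, e) => if e then none else some (ca ++ [String.ofList ac]))
      = pvLoopB (pvTokenize cs) campos actual := by
  intro cs
  induction cs using pvTokenize.induct with
  | case1 c rest ih =>
    intro campos actual
    simp [pvTokenize, pvLoopA, pvLoopB, ih]
  | case2 rest ih =>
    intro campos actual
    simp [pvTokenize, pvLoopA, pvLoopB, ih]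
  | case3 c rest h1 h2 ih =>
    intro campos actual
    by_cases hc : c = '\\'
    · subst hc
      cases rest with
      | nil => simp [pvTokenize, pvLoopA, pvLoopB]
      | cons r rs => exact absurd rfl (fun h => h1 r rs h rfl)
    · have hp : ¬ c = '|' := fun h => h2 h
      cases rest with
      | nil => simp [pvTokenize, pvLoopA, pvLoopB, hc, hp]
      | cons r rs =>
        rw [show pvTokenize (c :: r :: rs) = .plain c :: pvTokenize (r :: rs) by
              simp [pvTokenize],
            show pvLoopA (c :: r :: rs) campos actual false
                = pvLoopA (r :: rs) campos (actual ++ [c]) false by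
              simp [pvLoopA, hc, hp]]
        simp only [pvLoopB, if_neg hc]
        exact ih campos (actual ++ [c])
  | case4 =>
    intro campos actual
    simp [pvTokenize, pvLoopA, pvLoopB]

-- ===== VERDICT (by name: the statement is the Claim_ definition above) =====
theorem dividir_campos_escapados_py_spec : Claim_equal_dividir_campos_escapados_py := by
  intro linea _
  show _ = _
  simpa [dividir_campos_escapados_py, dividir_campos_escapados_py_alt] using
    pvLoop_eq linea.toList [] []
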